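-- pv_equiv track=rewrite | github.com/saakethtypes/Algos | swapping_problem.py | eval_swap
-- ===== SOURCE A (Python) =====
-- def eval_swap(a,b,i,j):
--     b[i],b[j]=b[j],b[i]
--     difference = []
--     ab = zip(a, b)
--     for ai, bi in ab:
--         difference.append(abs(ai-bi))
--     b[j],b[i]=b[i],b[j]
--     return sum(difference)
-- ===== SOURCE B (Python) =====
-- def eval_swap(a, b, i, j):
--     # Swapping b[i] and b[j] only changes two terms of the distance sum:
--     # take the base sum over the unswapped vectors and correct those two terms.
--     bi, bj = b[i], b[j]
--     base = sum(abs(x - y) for x, y in zip(a, b))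
--     return base + abs(a[i] - bj) - abs(a[i] - bi) + abs(a[j] - bi) - abs(a[j] - bj)
-- ===== Notes on version B (the rewrite author's own statement) =====
-- stated objective: simpler
-- what changed: B never mutates b and builds no list: it takes the base sum of |a[k]-b[k]| and adds the two point corrections at the swapped positions instead of A's swap / build-difference-list / sum / swap-back; Pre_ excludes unequal-length lists, a corner where A's zip silently truncates and B's direct indexing of a may raise or count the swap that A's truncation drops.
-- outside the precondition, e.g. on eval_swap([1, 2], [5, 7, 9], 2, 0): A returns 13, B raises IndexError; on eval_swap([1, 2, 3], [5, 7], 1, 0): A returns 9, B returns 9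
import Mathlib
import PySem

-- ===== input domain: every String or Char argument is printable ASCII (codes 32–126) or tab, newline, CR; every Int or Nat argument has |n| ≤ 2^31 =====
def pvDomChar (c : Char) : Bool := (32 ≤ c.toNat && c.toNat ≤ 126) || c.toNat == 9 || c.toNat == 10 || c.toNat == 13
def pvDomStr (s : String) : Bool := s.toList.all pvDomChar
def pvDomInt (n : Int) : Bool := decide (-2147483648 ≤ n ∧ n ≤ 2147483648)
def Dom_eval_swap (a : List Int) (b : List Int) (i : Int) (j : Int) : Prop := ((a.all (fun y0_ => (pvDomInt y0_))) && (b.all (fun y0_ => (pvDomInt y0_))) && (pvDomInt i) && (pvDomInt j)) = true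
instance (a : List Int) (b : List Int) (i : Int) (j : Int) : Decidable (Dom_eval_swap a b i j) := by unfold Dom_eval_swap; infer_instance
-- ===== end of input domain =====

-- B is simpler: no mutation and no intermediate list — the base distance sum plus two point
-- corrections at the swapped positions, instead of A's swap / build-list / sum / swap-back.
-- A restores b before returning, so neither version observably mutates its arguments.

-- ===== PORT A =====
def eval_swap (a : List Int) (b : List Int) (i : Int) (j : Int) : Int :=
  -- b[i],b[j] = b[j],b[i]
  let bi := PySem.List.pyGetD b i 0
  let bj := PySem.List.pyGetD b j 0
  let b1 := PySem.List.pySetD b i bj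
  let b2 := PySem.List.pySetD b1 j bi
  -- difference = []; for ai, bi in zip(a, b): difference.append(abs(ai-bi))
  let difference := (a.zip b2).foldl (fun acc p => acc ++ [|p.1 - p.2|]) ([] : List Int)
  -- (the second swap restores b; it does not affect the return value)
  -- return sum(difference)
  difference.foldl (· + ·) 0

-- ===== PORT B =====
def eval_swap_alt (a : List Int) (b : List Int) (i : Int) (j : Int) : Int :=
  let bi := PySem.List.pyGetD b i 0
  let bj := PySem.List.pyGetD b j 0
  let base := (a.zip b).foldl (fun acc p => acc + |p.1 - p.2|) 0
  base + |PySem.List.pyGetD a i 0 - bj| - |PySem.List.pyGetD a i 0 - bi|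
       + |PySem.List.pyGetD a j 0 - bi| - |PySem.List.pyGetD a j 0 - bj|

-- ===== PRECONDITION & SPEC =====
-- A raises IndexError when i or j is not a valid Python index into b; beyond that, Pre_ excludes
-- unequal-length lists — a corner where A's zip silently truncates the comparison and B's direct
-- indexing of a may raise (or count a swapped term that A's truncation drops).
def Pre_eval_swap (a : List Int) (b : List Int) (i : Int) (j : Int) : Prop :=
  a.length = b.length ∧ PySem.Raise.InRange b.length i ∧ PySem.Raise.InRange b.length j
instance (a : List Int) (b : List Int) (i : Int) (j : Int) : Decidable (Pre_eval_swap a b i j) := by unfold Pre_eval_swap; infer_instance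

def pvWitness_eval_swap : List Int × List Int × Int × Int := ([3, -1, 4], [2, 7, 0], 0, -1)

def Spec_eval_swap (a : List Int) (b : List Int) (i : Int) (j : Int) (out : Int) : Prop := out = eval_swap_alt a b i j
instance (a : List Int) (b : List Int) (i : Int) (j : Int) (out : Int) : Decidable (Spec_eval_swap a b i j out) := by unfold Spec_eval_swap; infer_instance

-- ===== CLAIM (what is proved, stated in full; the proofs are below) =====
def Claim_equal_eval_swap : Prop := ∀ (a : List Int) (b : List Int) (i : Int) (j : Int), Dom_eval_swap a b i j → Pre_eval_swap a b i j → Spec_eval_swap a b i j (eval_swap a b i j)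

-- ===== LEMMAS AND PROOFS =====

-- normalisation of a valid Python index
theorem pyIdx_norm (n : Nat) (i : Int) (h : PySem.Raise.InRange n i) :
    PySem.List.pyIdx? n i = some (if i < 0 then (i + n).toNat else i.toNat) := by
  obtain ⟨h1, h2⟩ := h
  unfold PySem.List.pyIdx?
  split_ifs <;> simp <;> omega

theorem norm_lt (n : Nat) (i : Int) (h : PySem.Raise.InRange n i) :
    (if i < 0 then (i + n).toNat else i.toNat) < n := by
  obtain ⟨h1, h2⟩ := h; split_ifs <;> omega

theorem pyGetD_norm (b : List Int) (i : Int) (d : Int) (h : PySem.Raise.InRange b.length i) :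
    PySem.List.pyGetD b i d = b.getD (if i < 0 then (i + b.length).toNat else i.toNat) d := by
  unfold PySem.List.pyGetD PySem.List.pyGet?
  rw [pyIdx_norm _ _ h]
  simp [List.getD]

theorem pySetD_norm (b : List Int) (i : Int) (v : Int) (h : PySem.Raise.InRange b.length i) :
    PySem.List.pySetD b i v = b.set (if i < 0 then (i + b.length).toNat else i.toNat) v := by
  unfold PySem.List.pySetD PySem.List.pySet?
  rw [pyIdx_norm _ _ h]
  rfl

-- sum of |x - y| over zip
def zabs (a c : List Int) : Int := ((a.zip c).map (fun p => |p.1 - p.2|)).sum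

-- changing one entry of c shifts the zip sum by a point correction
theorem zabs_set (a : List Int) : ∀ (c : List Int) (m : Nat) (v : Int), m < c.length →
    zabs a (c.set m v) =
      zabs a c + (if m < a.length then |a.getD m 0 - v| - |a.getD m 0 - c.getD m 0| else 0) := by
  induction a with
  | nil => intro c m v _; simp [zabs]
  | cons x a' ih =>
    intro c m v hm
    cases c with
    | nil => simp at hm
    | cons y c' =>
      cases m with
      | zero => simp [zabs, List.getD]; ring
      | succ m =>
        have hm' : m < c'.length := by simpa using hm
        have := ih c' m v hm'
        simp only [zabs, List.set_cons_succ, List.zip_cons_cons, List.map_cons, List.sum_cons,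
          List.getD_cons_succ, List.length_cons, Nat.succ_lt_succ_iff] at *
        omega

theorem foldl_append_abs (l : List (Int × Int)) : ∀ acc : List Int,
    l.foldl (fun acc p => acc ++ [|p.1 - p.2|]) acc = acc ++ l.map (fun p => |p.1 - p.2|) := by
  induction l with
  | nil => simp
  | cons x l ih => intro acc; simp [ih]

theorem foldl_acc_add (l : List Int) : ∀ acc : Int, l.foldl (· + ·) acc = acc + l.sum := by
  induction l with
  | nil => simp
  | cons x l ih => intro acc; simp [ih]; ring

theorem foldl_acc_add_abs (a c : List Int) : ∀ acc : Int,
    (a.zip c).foldl (fun acc p => acc + |p.1 - p.2|) acc = acc + zabs a c := by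
  induction a generalizing c with
  | nil => intro acc; simp [zabs]
  | cons x a' ih =>
    intro acc
    cases c with
    | nil => simp [zabs]
    | cons y c' => simp [zabs, ih c']; ring

theorem getD_set_self (c : List Int) (m : Nat) (v : Int) (h : m < c.length) :
    (c.set m v).getD m 0 = v := by
  rw [List.getD_eq_getElem _ _ (by simpa using h)]
  simp [List.getElem_set_self]

-- ===== VERDICT (by name: the statement is the Claim_ definition above) =====
theorem eval_swap_spec : Claim_equal_eval_swap := by
  intro a b i j _ hpre
  obtain ⟨hlen, hi, hj⟩ := hpre
  unfold Spec_eval_swap eval_swap eval_swap_alt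
  set mi : Nat := if i < 0 then (i + b.length).toNat else i.toNat with hmi
  set mj : Nat := if j < 0 then (j + b.length).toNat else j.toNat with hmj
  have hmil : mi < b.length := norm_lt _ _ hi
  have hmjl : mj < b.length := norm_lt _ _ hj
  have hia : PySem.Raise.InRange a.length i := by rw [hlen]; exact hi
  have hja : PySem.Raise.InRange a.length j := by rw [hlen]; exact hj
  have hbi : PySem.List.pyGetD b i 0 = b.getD mi 0 := pyGetD_norm b i 0 hi
  have hbj : PySem.List.pyGetD b j 0 = b.getD mj 0 := pyGetD_norm b j 0 hj
  have hai : PySem.List.pyGetD a i 0 = a.getD mi 0 := by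
    rw [pyGetD_norm a i 0 hia, hlen]
  have haj : PySem.List.pyGetD a j 0 = a.getD mj 0 := by
    rw [pyGetD_norm a j 0 hja, hlen]
  have hseti : PySem.List.pySetD b i (b.getD mj 0) = b.set mi (b.getD mj 0) :=
    pySetD_norm b i _ hi
  have hsetj : PySem.List.pySetD (b.set mi (b.getD mj 0)) j (b.getD mi 0)
      = (b.set mi (b.getD mj 0)).set mj (b.getD mi 0) := by
    have : PySem.Raise.InRange (b.set mi (b.getD mj 0)).length j := by simpa using hj
    simpa [hmj] using pySetD_norm (b.set mi (b.getD mj 0)) j (b.getD mi 0) this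
  simp only [hbi, hbj, hai, haj, hseti, hsetj]
  -- left side: foldl-append builds the map, foldl-add sums it
  rw [foldl_append_abs, foldl_acc_add, foldl_acc_add_abs]
  -- compute the doubly-set zip sum by two point corrections
  have h1 := zabs_set a (b.set mi (b.getD mj 0)) mj (b.getD mi 0) (by simpa using hmjl)
  have h2 := zabs_set a b mi (b.getD mj 0) hmil
  have hb1 : (b.set mi (b.getD mj 0)).getD mj 0 = b.getD mj 0 := by
    by_cases h : mj = mi
    · rw [h]; exact getD_set_self b mi _ hmil
    · have h1' : mj < (b.set mi (b.getD mj 0)).length := by simpa using hmjl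
      rw [List.getD_eq_getElem _ _ h1', List.getElem_set_ne (by omega)]
      exact (List.getD_eq_getElem _ _ hmjl).symm
  have hmia : mi < a.length := by omega
  have hmja : mj < a.length := by omega
  simp only [zabs, List.nil_append, zero_add] at *
  rw [h1, h2, hb1]
  simp only [if_pos hmia, if_pos hmja]
  ring
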